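-- pv_equiv track=rewrite | github.com/coinspark/libraries | python/coinspark.py | CoinSparkHexToRawString
-- ===== SOURCE A (Python) =====
-- import math, string, re, hashlib, binascii, random
--
-- def CoinSparkHexToRawString(hex):
-- 	if (len(hex)%2) or not all(charTest in string.hexdigits for charTest in hex):
-- 		return None
-- 	else:
-- 		raw=binascii.a2b_hex(hex)
-- 		if not isinstance(raw, str): # to support Python 3
-- 			raw="".join(map(chr, raw))
--
-- 	return raw
-- ===== SOURCE B (Python) =====
-- _HEXVAL = {c: v for v, c in enumerate("0123456789abcdef")}
-- _HEXVAL.update({c: v for v, c in enumerate("0123456789ABCDEF")})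
--
-- def CoinSparkHexToRawString(hex):
-- 	# single pass: convert each char to its nibble, pairing as we go;
-- 	# an invalid char or a leftover nibble (odd length) yields None
-- 	out = []
-- 	pending = None
-- 	for ch in hex:
-- 		v = _HEXVAL.get(ch)
-- 		if v is None:
-- 			return None
-- 		if pending is None:
-- 			pending = v
-- 		else:
-- 			out.append(chr(pending * 16 + v))
-- 			pending = None
-- 	if pending is not None:
-- 		return None
-- 	return "".join(out)
-- ===== Notes on version B (the rewrite author's own statement) =====
-- stated objective: alternative
-- what changed: A validates the whole string against string.hexdigits and then calls binascii.a2b_hex and maps chr; B makes one pass over the characters, converting each to its nibble via a table and pairing nibbles as it goes, with invalid chars and odd length detected in the same pass.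
import Mathlib
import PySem

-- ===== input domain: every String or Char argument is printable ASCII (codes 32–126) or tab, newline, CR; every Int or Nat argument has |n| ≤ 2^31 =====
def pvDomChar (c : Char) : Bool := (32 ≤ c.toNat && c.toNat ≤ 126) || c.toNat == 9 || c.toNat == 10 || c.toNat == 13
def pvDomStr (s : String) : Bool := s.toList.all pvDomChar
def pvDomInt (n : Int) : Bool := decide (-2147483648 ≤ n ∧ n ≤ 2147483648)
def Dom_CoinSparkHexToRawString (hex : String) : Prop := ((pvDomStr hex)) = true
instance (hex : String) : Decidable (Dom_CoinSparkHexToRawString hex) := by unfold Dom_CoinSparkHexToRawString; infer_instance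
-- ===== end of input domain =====

-- B replaces A's whole-string hexdigits validation followed by binascii.a2b_hex + chr-join
-- by a single pass that pairs nibbles as it goes (alternative decomposition, same cost).

-- shared nibble table (the value of a hex digit; used by A's hand-ported a2b_hex decode
-- and by B's per-character dict lookup)
def hexVal? (c : Char) : Option Nat :=
  if c = '0' then some 0 else if c = '1' then some 1 else if c = '2' then some 2
  else if c = '3' then some 3 else if c = '4' then some 4 else if c = '5' then some 5
  else if c = '6' then some 6 else if c = '7' then some 7 else if c = '8' then some 8
  else if c = '9' then some 9
  else if c = 'a' then some 10 else if c = 'b' then some 11 else if c = 'c' then some 12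
  else if c = 'd' then some 13 else if c = 'e' then some 14 else if c = 'f' then some 15
  else if c = 'A' then some 10 else if c = 'B' then some 11 else if c = 'C' then some 12
  else if c = 'D' then some 13 else if c = 'E' then some 14 else if c = 'F' then some 15
  else none

-- ===== PORT A =====
-- string.hexdigits
def hexdigitsChars : List Char := "0123456789abcdefABCDEF".toList

-- hand port of binascii.a2b_hex followed by "".join(map(chr, raw)): two hex digits per
-- output char (exact on even-length all-hexdigit input, which A's guard ensures)
def a2bHexJoin : List Char → List Char
  | a :: b :: rest =>
      Char.ofNat ((hexVal? a).getD 0 * 16 + (hexVal? b).getD 0) :: a2bHexJoin rest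
  | _ => []

def CoinSparkHexToRawString (hex : String) : Option String :=
  if hex.toList.length % 2 ≠ 0 ∨ ¬ (hex.toList.all fun c => hexdigitsChars.contains c)
  then none
  else some (String.mk (a2bHexJoin hex.toList))

-- ===== PORT B =====
-- one pass: pending nibble state; invalid char → none; leftover nibble at the end → none
def altLoop : List Char → Option Nat → List Char → Option (List Char)
  | [], none, acc => some acc.reverse
  | [], some _, _ => none
  | c :: rest, pending, acc =>
      match hexVal? c with
      | none => none
      | some v =>
          match pending with
          | none => altLoop rest (some v) acc
          | some p => altLoop rest none (Char.ofNat (p * 16 + v) :: acc)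

def CoinSparkHexToRawString_alt (hex : String) : Option String :=
  (altLoop hex.toList none []).map String.mk

-- ===== PRECONDITION & SPEC =====
def Spec_CoinSparkHexToRawString (hex : String) (out : Option String) : Prop := out = CoinSparkHexToRawString_alt hex
instance (hex : String) (out : Option String) : Decidable (Spec_CoinSparkHexToRawString hex out) := by unfold Spec_CoinSparkHexToRawString; infer_instance

-- ===== CLAIM (what is proved, stated in full; the proofs are below) =====
def Claim_equal_CoinSparkHexToRawString : Prop := ∀ (hex : String), Dom_CoinSparkHexToRawString hex → Spec_CoinSparkHexToRawString hex (CoinSparkHexToRawString hex)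

-- ===== LEMMAS AND PROOFS =====

set_option maxHeartbeats 1000000 in
theorem hexVal?_isSome_iff_contains (c : Char) :
    (hexVal? c).isSome = hexdigitsChars.contains c := by
  by_cases hm : c ∈ hexdigitsChars
  · have h2 : hexdigitsChars.contains c = true := by simpa using hm
    rw [h2]
    have : c = '0' ∨ c = '1' ∨ c = '2' ∨ c = '3' ∨ c = '4' ∨ c = '5' ∨ c = '6' ∨ c = '7' ∨
        c = '8' ∨ c = '9' ∨ c = 'a' ∨ c = 'b' ∨ c = 'c' ∨ c = 'd' ∨ c = 'e' ∨ c = 'f' ∨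
        c = 'A' ∨ c = 'B' ∨ c = 'C' ∨ c = 'D' ∨ c = 'E' ∨ c = 'F' := by
      simpa [hexdigitsChars] using hm
    obtain h|h|h|h|h|h|h|h|h|h|h|h|h|h|h|h|h|h|h|h|h|h := this <;> subst h <;> decide
  · have h2 : hexdigitsChars.contains c = false := by simpa using hm
    rw [h2]
    unfold hexVal?
    repeat rw [if_neg (by rintro rfl; exact hm (by decide))]
    rfl

-- characterisation of B's single-pass loop started with no pending nibble
theorem altLoop_spec : ∀ (cs acc : List Char),
    altLoop cs none acc =
      if cs.length % 2 = 0 ∧ cs.all (fun c => (hexVal? c).isSome)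
      then some (acc.reverse ++ a2bHexJoin cs) else none
  | [], acc => by simp [altLoop, a2bHexJoin]
  | [c], acc => by
      cases hc : hexVal? c <;> simp [altLoop, hc]
  | c :: d :: rest, acc => by
      cases hc : hexVal? c with
      | none => simp [altLoop, hc]
      | some v =>
        cases hd : hexVal? d with
        | none => simp [altLoop, hc, hd]
        | some w =>
          rw [show altLoop (c :: d :: rest) none acc
                = altLoop rest none (Char.ofNat (v * 16 + w) :: acc) by
              simp [altLoop, hc, hd]]
          rw [altLoop_spec rest (Char.ofNat (v * 16 + w) :: acc)]
          simp [a2bHexJoin, hc, hd, Nat.succ_mod_two_eq_zero_iff,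
            Nat.succ_mod_two_eq_one_iff]

-- ===== VERDICT (by name: the statement is the Claim_ definition above) =====
theorem CoinSparkHexToRawString_spec : Claim_equal_CoinSparkHexToRawString := by
  intro hex _
  unfold Spec_CoinSparkHexToRawString CoinSparkHexToRawString CoinSparkHexToRawString_alt
  have hall : (hex.toList.all fun c => (hexVal? c).isSome)
      = (hex.toList.all fun c => hexdigitsChars.contains c) := by
    simp only [hexVal?_isSome_iff_contains]
  rw [altLoop_spec hex.toList [], hall]
  by_cases h1 : hex.toList.length % 2 = 0
  · by_cases h2 : (hex.toList.all fun c => hexdigitsChars.contains c) = true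
    · rw [if_neg (fun hc => hc.elim (fun h => h h1) (fun h => h h2)), if_pos ⟨h1, h2⟩]
      simp
    · rw [if_pos (Or.inr h2), if_neg (fun h => h2 h.2)]
      rfl
  · rw [if_pos (Or.inl h1), if_neg (fun h => h1 h.1)]
    rfl
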